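-- pv_equiv track=rewrite | github.com/eliottcassidy2000/math | 04-computation/beta3_seesaw_approach.py | is_strongly_connected
-- ===== SOURCE A (Python) =====
-- def is_strongly_connected(T, n):
--     """Check if tournament T on n vertices is strongly connected."""
--     # BFS from vertex 0
--     visited = {0}
--     queue = [0]
--     while queue:
--         v = queue.pop(0)
--         for w in range(n):
--             if w not in visited and T[v][w]:
--                 visited.add(w)
--                 queue.append(w)
--     if len(visited) < n:
--         return False
--     # Also check reverse reachability
--     visited = {0}
--     queue = [0]
--     while queue:
--         v = queue.pop(0)
--         for w in range(n):
--             if w not in visited and T[w][v]: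
--                 visited.add(w)
--                 queue.append(w)
--     return len(visited) == n
-- ===== SOURCE B (Python) =====
-- def is_strongly_connected(T, n):
--     """Check if tournament T on n vertices is strongly connected."""
--     # Round-based saturation instead of a BFS queue: each round adds every
--     # vertex with an edge from the current reachable set, until a fixpoint.
--     def reach(edge):
--         vis = {0}
--         for _ in range(n):
--             new = {w for w in range(n) if w not in vis and any(edge(v, w) for v in vis)}
--             if not new:
--                 break
--             vis |= new
--         return vis
--     if len(reach(lambda a, b: T[a][b])) < n:
--         return False
--     return len(reach(lambda a, b: T[b][a])) == n
-- ===== Notes on version B (the rewrite author's own statement) =====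
-- stated objective: alternative
-- what changed: Replaces the two queue-based BFS passes by round-based frontier saturation: each round adds every vertex with an edge from the current reachable set (a set comprehension over range(n) with any()), stopping at a fixpoint, instead of popping vertices off a FIFO queue.
-- outside the precondition, e.g. on is_strongly_connected([[0, 0], []], 2): A returns False, B returns False
import Mathlib
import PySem

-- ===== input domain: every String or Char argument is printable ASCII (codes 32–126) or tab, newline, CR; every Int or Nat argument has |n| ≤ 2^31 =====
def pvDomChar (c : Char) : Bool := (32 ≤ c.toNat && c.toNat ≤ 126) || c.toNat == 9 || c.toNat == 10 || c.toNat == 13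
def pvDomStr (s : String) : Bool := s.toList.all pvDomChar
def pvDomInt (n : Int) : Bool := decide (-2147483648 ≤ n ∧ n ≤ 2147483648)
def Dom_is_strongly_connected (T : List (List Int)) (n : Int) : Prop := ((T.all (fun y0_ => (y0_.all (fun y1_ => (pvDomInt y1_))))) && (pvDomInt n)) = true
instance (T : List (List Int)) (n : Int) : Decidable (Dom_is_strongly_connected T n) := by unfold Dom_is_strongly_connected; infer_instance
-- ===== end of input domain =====

-- B replaces A's queue-based BFS by round-based frontier saturation (repeatedly adding every
-- vertex with an edge from the current reachable set until a fixpoint): an alternative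
-- decomposition of the same reachability computation, proved to return the same Bool.


-- ===== PORT A =====
-- A's two BFS passes differ only in the edge test (T[v][w] vs T[w][v]); the loop is a helper
-- parametrised by that test.  `pvUnvis` and the two `mu` lemmas exist only for termination
-- of the while-loop (cited in `decreasing_by`).

-- a strict filter-count comparison (used only for termination of the BFS loop)
theorem countP_strict (l : List Int) (p q : Int → Bool) (w : Int) (hw : w ∈ l)
    (hp : p w = true) (hq : q w = false) (himp : ∀ x, q x = true → p x = true) :
    l.countP q < l.countP p := by
  obtain ⟨s, t, rfl⟩ := List.mem_iff_append.mp hw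
  have hs : s.countP q ≤ s.countP p := List.countP_mono_left (fun x _ => himp x)
  have ht : t.countP q ≤ t.countP p := List.countP_mono_left (fun x _ => himp x)
  simp [List.countP_append, hp, hq]
  omega

-- number of vertices of range(n) not yet visited (termination measure component)
def pvUnvis (n : Int) (vis : PySem.Set Int) : Nat :=
  ((PySem.List.pyRange 0 n 1).filter (fun w => !(PySem.Set.contains vis w))).length

-- one step of A's inner `for w in range(n)` loop: `if w not in visited and T[v][w]: add, append`
def bfsStep (e : Int → Int → Bool) (v : Int) (st : PySem.Set Int × List Int) (w : Int) :
    PySem.Set Int × List Int :=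
  if !(PySem.Set.contains st.1 w) && e v w then (PySem.Set.add st.1 w, st.2 ++ [w]) else st

theorem bfsStep_mu (e : Int → Int → Bool) (v n : Int) (st : PySem.Set Int × List Int) (w : Int)
    (hw : w ∈ PySem.List.pyRange 0 n 1) :
    2 * pvUnvis n (bfsStep e v st w).1 + (bfsStep e v st w).2.length ≤
      2 * pvUnvis n st.1 + st.2.length := by
  unfold bfsStep pvUnvis
  split
  case isTrue h =>
    simp only [Bool.and_eq_true, Bool.not_eq_true'] at h
    have hlt : ((PySem.List.pyRange 0 n 1).countP
          (fun x => !(PySem.Set.contains (PySem.Set.add st.1 w) x))) <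
        ((PySem.List.pyRange 0 n 1).countP (fun x => !(PySem.Set.contains st.1 x))) := by
      apply countP_strict _ _ _ w hw
      · simp only [Bool.not_eq_true']; exact h.1
      · simp [PySem.Set.mem_add]
      · intro x hx
        simp only [Bool.not_eq_true'] at hx ⊢
        simp only [← Bool.not_eq_true, PySem.Set.contains_iff, PySem.Set.mem_add] at hx ⊢
        tauto
    simp only [← List.countP_eq_length_filter]
    simp only [List.length_append, List.length_cons, List.length_nil]
    omega
  case isFalse => exact le_rfl

theorem bfsFold_mu (e : Int → Int → Bool) (v n : Int) (L : List Int)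
    (hL : ∀ w ∈ L, w ∈ PySem.List.pyRange 0 n 1) (st : PySem.Set Int × List Int) :
    2 * pvUnvis n (L.foldl (bfsStep e v) st).1 + (L.foldl (bfsStep e v) st).2.length ≤
      2 * pvUnvis n st.1 + st.2.length := by
  induction L generalizing st with
  | nil => exact le_rfl
  | cons w L ih =>
    exact le_trans (ih (fun x hx => hL x (List.mem_cons_of_mem _ hx)) _)
      (bfsStep_mu e v n st w (hL w List.mem_cons_self))

-- A's `while queue:` loop (queue.pop(0) = take the head)
def bfsLoop (e : Int → Int → Bool) (n : Int) (visited : PySem.Set Int) (queue : List Int) :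
    PySem.Set Int :=
  match queue with
  | [] => visited
  | v :: rest =>
    let st := (PySem.List.pyRange 0 n 1).foldl (bfsStep e v) (visited, rest)
    bfsLoop e n st.1 st.2
termination_by 2 * pvUnvis n visited + queue.length
decreasing_by
  have h := bfsFold_mu e v n (PySem.List.pyRange 0 n 1) (fun x hx => hx) (visited, rest)
  simp only [List.length_cons]
  dsimp only at h
  omega

def is_strongly_connected (T : List (List Int)) (n : Int) : Bool :=
  let visited := bfsLoop (fun v w => PySem.List.pyGetD (PySem.List.pyGetD T v []) w 0 != 0) n
      (PySem.Set.ofList [0]) [0]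
  if PySem.Set.len visited < n then false
  else
    let visited2 := bfsLoop (fun v w => PySem.List.pyGetD (PySem.List.pyGetD T w []) v 0 != 0) n
        (PySem.Set.ofList [0]) [0]
    PySem.Set.len visited2 == n

-- ===== PORT B =====
-- `{w for w in range(n) if w not in vis and any(edge(v, w) for v in vis)}`
def newSet (e : Int → Int → Bool) (n : Int) (vis : PySem.Set Int) : PySem.Set Int :=
  PySem.Set.ofList ((PySem.List.pyRange 0 n 1).filter
    (fun w => !(PySem.Set.contains vis w) && vis.any (fun v => e v w)))

-- B's `for _ in range(n)` loop with the `if not new: break`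
def reachIter (e : Int → Int → Bool) (n : Int) : List Int → PySem.Set Int → PySem.Set Int
  | [], vis => vis
  | _ :: rest, vis =>
    let new := newSet e n vis
    if new = [] then vis else reachIter e n rest (PySem.Set.union vis new)

def is_strongly_connected_alt (T : List (List Int)) (n : Int) : Bool :=
  let fwd := reachIter (fun a b => PySem.List.pyGetD (PySem.List.pyGetD T a []) b 0 != 0) n
      (PySem.List.pyRange 0 n 1) (PySem.Set.ofList [0])
  if PySem.Set.len fwd < n then false
  else
    let back := reachIter (fun a b => PySem.List.pyGetD (PySem.List.pyGetD T b []) a 0 != 0) n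
        (PySem.List.pyRange 0 n 1) (PySem.Set.ofList [0])
    PySem.Set.len back == n

-- ===== PRECONDITION & SPEC =====
-- Pre_ requires the full n×n matrix prefix to be present (when n > 0): outside it A can hit an
-- IndexError; this also excludes some ragged inputs on which A happens to return False before
-- reading the missing entry (see the cite in claim.json).
def Pre_is_strongly_connected (T : List (List Int)) (n : Int) : Prop :=
  0 < n → n ≤ T.length ∧ ∀ row ∈ T.take n.toNat, n ≤ row.length
instance (T : List (List Int)) (n : Int) : Decidable (Pre_is_strongly_connected T n) := by
  unfold Pre_is_strongly_connected; infer_instance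

def pvWitness_is_strongly_connected : List (List Int) × Int := ([[0, 1], [1, 0]], 2)

def Spec_is_strongly_connected (T : List (List Int)) (n : Int) (out : Bool) : Prop := out = is_strongly_connected_alt T n
instance (T : List (List Int)) (n : Int) (out : Bool) : Decidable (Spec_is_strongly_connected T n out) := by unfold Spec_is_strongly_connected; infer_instance

-- ===== CLAIM (what is proved, stated in full; the proofs are below) =====
def Claim_equal_is_strongly_connected : Prop := ∀ (T : List (List Int)) (n : Int), Dom_is_strongly_connected T n → Pre_is_strongly_connected T n → Spec_is_strongly_connected T n (is_strongly_connected T n)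

-- ===== LEMMAS AND PROOFS =====

-- the set both loops compute: vertices reachable from 0 through e-edges inside range(n)
inductive Reach (e : Int → Int → Bool) (n : Int) : Int → Prop
  | zero : Reach e n 0
  | step {v w : Int} : Reach e n v → 0 ≤ w → w < n → e v w = true → Reach e n w

theorem Reach_subset (e : Int → Int → Bool) (n : Int) (S : List Int)
    (h0 : (0 : Int) ∈ S)
    (hcl : ∀ v ∈ S, ∀ w : Int, 0 ≤ w → w < n → e v w = true → w ∈ S) :
    ∀ x, Reach e n x → x ∈ S := by
  intro x hx
  induction hx with
  | zero => exact h0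
  | step hv h0w hwn hevw ih => exact hcl _ ih _ h0w hwn hevw

theorem bfsStep_props (e : Int → Int → Bool) (v : Int) (st : PySem.Set Int × List Int) (w : Int) :
    (∀ x ∈ st.1, x ∈ (bfsStep e v st w).1) ∧
    (∀ x ∈ (bfsStep e v st w).1, x ∈ st.1 ∨ (x = w ∧ e v x = true)) ∧
    (st.1.Nodup → (bfsStep e v st w).1.Nodup) ∧
    (∀ x ∈ (bfsStep e v st w).2, x ∈ st.2 ∨ (x ∈ (bfsStep e v st w).1 ∧ x ∉ st.1)) ∧
    (e v w = true → w ∈ (bfsStep e v st w).1) ∧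
    (∀ x ∈ (bfsStep e v st w).1, x ∈ st.1 ∨ x ∈ (bfsStep e v st w).2) ∧
    (∀ x ∈ st.2, x ∈ (bfsStep e v st w).2) := by
  unfold bfsStep
  split
  case isTrue h =>
    simp only [Bool.and_eq_true, Bool.not_eq_true'] at h
    have hwn : w ∉ st.1 := fun hm => by
      have := (PySem.Set.contains_iff _ _).mpr hm; rw [h.1] at this; exact Bool.false_ne_true this
    refine ⟨?_, ?_, ?_, ?_, ?_, ?_, ?_⟩
    · intro x hx; exact (PySem.Set.mem_add _ _ _).mpr (Or.inl hx)
    · intro x hx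
      rcases (PySem.Set.mem_add _ _ _).mp hx with hx | rfl
      · exact Or.inl hx
      · exact Or.inr ⟨rfl, h.2⟩
    · intro hn; exact PySem.Set.nodup_add _ _ hn
    · intro x hx
      rcases List.mem_append.mp hx with hx | hx
      · exact Or.inl hx
      · rcases List.mem_singleton.mp hx with rfl
        exact Or.inr ⟨(PySem.Set.mem_add _ _ _).mpr (Or.inr rfl), hwn⟩
    · intro _; exact (PySem.Set.mem_add _ _ _).mpr (Or.inr rfl)
    · intro x hx
      rcases (PySem.Set.mem_add _ _ _).mp hx with hx | rfl
      · exact Or.inl hx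
      · exact Or.inr (List.mem_append.mpr (Or.inr (List.mem_singleton.mpr rfl)))
    · intro x hx; exact List.mem_append.mpr (Or.inl hx)
  case isFalse h =>
    refine ⟨fun x hx => hx, fun x hx => Or.inl hx, id, fun x hx => Or.inl hx, ?_, fun x hx => Or.inl hx, fun x hx => hx⟩
    intro he
    by_cases hc : PySem.Set.contains st.1 w = true
    · exact (PySem.Set.contains_iff _ _).mp hc
    · have hc' : PySem.Set.contains st.1 w = false := by simpa using hc
      exact absurd (by rw [hc', he]; rfl) h

theorem bfsFold_spec (e : Int → Int → Bool) (v n : Int) (L : List Int)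
    (hL : ∀ w ∈ L, 0 ≤ w ∧ w < n) (st : PySem.Set Int × List Int) :
    (∀ x ∈ st.1, x ∈ (L.foldl (bfsStep e v) st).1) ∧
    (∀ x ∈ (L.foldl (bfsStep e v) st).1, x ∈ st.1 ∨ (0 ≤ x ∧ x < n ∧ e v x = true)) ∧
    (st.1.Nodup → (L.foldl (bfsStep e v) st).1.Nodup) ∧
    (∀ x ∈ (L.foldl (bfsStep e v) st).2, x ∈ st.2 ∨ (x ∈ (L.foldl (bfsStep e v) st).1 ∧ x ∉ st.1)) ∧
    (∀ w ∈ L, e v w = true → w ∈ (L.foldl (bfsStep e v) st).1) ∧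
    (∀ x ∈ (L.foldl (bfsStep e v) st).1, x ∈ st.1 ∨ x ∈ (L.foldl (bfsStep e v) st).2) ∧
    (∀ x ∈ st.2, x ∈ (L.foldl (bfsStep e v) st).2) := by
  induction L generalizing st with
  | nil =>
    exact ⟨fun x h => h, fun x h => Or.inl h, id, fun x h => Or.inl h, by simp,
      fun x h => Or.inl h, fun x h => h⟩
  | cons w L ih =>
    simp only [List.foldl_cons]
    obtain ⟨S1, S2, S3, S4, S5, S6, S7⟩ := bfsStep_props e v st w
    obtain ⟨I1, I2, I3, I4, I5, I6, I7⟩ := ih (fun x hx => hL x (List.mem_cons_of_mem _ hx)) (bfsStep e v st w)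
    refine ⟨?_, ?_, ?_, ?_, ?_, ?_, ?_⟩
    · exact fun x hx => I1 x (S1 x hx)
    · intro x hx
      rcases I2 x hx with hx' | hb
      · rcases S2 x hx' with h' | ⟨rfl, he⟩
        · exact Or.inl h'
        · exact Or.inr ⟨(hL x List.mem_cons_self).1, (hL x List.mem_cons_self).2, he⟩
      · exact Or.inr hb
    · exact fun hn => I3 (S3 hn)
    · intro x hx
      rcases I4 x hx with hx' | ⟨hf, hns⟩
      · rcases S4 x hx' with h' | ⟨hin, hnin⟩
        · exact Or.inl h'
        · exact Or.inr ⟨I1 x hin, hnin⟩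
      · refine Or.inr ⟨hf, fun hin => hns (S1 x hin)⟩
    · intro w' hw' he
      rcases List.mem_cons.mp hw' with rfl | hw'
      · exact I1 _ (S5 he)
      · exact I5 w' hw' he
    · intro x hx
      rcases I6 x hx with hx' | hq
      · rcases S6 x hx' with h' | hq'
        · exact Or.inl h'
        · exact Or.inr (I7 x hq')
      · exact Or.inr hq
    · exact fun x hx => I7 x (S7 x hx)

theorem bfsLoop_spec (e : Int → Int → Bool) (n : Int) (visited : PySem.Set Int) (queue : List Int)
    (h1 : visited.Nodup)
    (h2 : ∀ v ∈ visited, Reach e n v)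
    (h4 : ∀ v ∈ queue, v ∈ visited)
    (h3 : ∀ v ∈ visited, v ∉ queue → ∀ w : Int, 0 ≤ w → w < n → e v w = true → w ∈ visited) :
    (bfsLoop e n visited queue).Nodup ∧
    (∀ v ∈ visited, v ∈ bfsLoop e n visited queue) ∧
    (∀ x ∈ bfsLoop e n visited queue, Reach e n x) ∧
    (∀ v ∈ bfsLoop e n visited queue, ∀ w : Int, 0 ≤ w → w < n → e v w = true →
      w ∈ bfsLoop e n visited queue) := by
  induction visited, queue using bfsLoop.induct e n with
  | case1 visited =>
    simp only [bfsLoop]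
    exact ⟨h1, fun v hv => hv, h2, fun v hv w h0w hwn he => h3 v hv (List.not_mem_nil) w h0w hwn he⟩
  | case2 visited v rest st ih =>
    have hrw : bfsLoop e n visited (v :: rest) = bfsLoop e n st.1 st.2 := by rw [bfsLoop]
    have hvr : ∀ w ∈ PySem.List.pyRange 0 n 1, 0 ≤ w ∧ w < n :=
      fun w hw => PySem.List.mem_pyRange_one.mp hw
    obtain ⟨F1, F2, F3, F4, F5, F6, F7⟩ := bfsFold_spec e v n _ hvr (visited, rest)
    have hv : v ∈ visited := h4 v List.mem_cons_self
    have n1 : st.1.Nodup := F3 h1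
    have n2 : ∀ x ∈ st.1, Reach e n x := by
      intro x hx
      rcases F2 x hx with hx' | ⟨h0, hn', he⟩
      · exact h2 x hx'
      · exact Reach.step (h2 v hv) h0 hn' he
    have n4 : ∀ x ∈ st.2, x ∈ st.1 := by
      intro x hx
      rcases F4 x hx with hx' | ⟨hm, _⟩
      · exact F1 x (h4 x (List.mem_cons_of_mem _ hx'))
      · exact hm
    have n3 : ∀ u ∈ st.1, u ∉ st.2 → ∀ w : Int, 0 ≤ w → w < n → e u w = true → w ∈ st.1 := by
      intro u hu hnq w h0w hwn he
      rcases F6 u hu with huv | huq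
      · by_cases hueq : u = v
        · subst hueq
          exact F5 w (PySem.List.mem_pyRange_one.mpr ⟨h0w, hwn⟩) he
        · have hur : u ∉ rest := fun hr => hnq (F7 u hr)
          have hnc : u ∉ v :: rest := by simp [List.mem_cons, hueq, hur]
          exact F1 w (h3 u huv hnc w h0w hwn he)
      · exact absurd huq hnq
    obtain ⟨R1, R2, R3, R4⟩ := ih n1 n2 n4 n3
    rw [hrw]
    exact ⟨R1, fun x hx => R2 x (F1 x hx), R3, R4⟩

theorem bfs_mem (e : Int → Int → Bool) (n : Int) :
    (bfsLoop e n (PySem.Set.ofList [0]) [0]).Nodup ∧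
    (∀ x, x ∈ bfsLoop e n (PySem.Set.ofList [0]) [0] ↔ Reach e n x) := by
  have hofl : (PySem.Set.ofList [0] : List Int) = [0] := by decide
  obtain ⟨R1, R2, R3, R4⟩ := bfsLoop_spec e n (PySem.Set.ofList [0]) [0]
    (by rw [hofl]; exact List.nodup_singleton 0)
    (by rw [hofl]; intro v hv; rcases List.mem_singleton.mp hv with rfl; exact Reach.zero)
    (by rw [hofl]; exact fun v hv => hv)
    (by rw [hofl]; intro v hv hnq
        rcases List.mem_singleton.mp hv with rfl
        exact absurd (List.mem_singleton.mpr rfl) hnq)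
  exact ⟨R1, fun x => ⟨R3 x, fun hr =>
    Reach_subset e n _ (R2 0 (by rw [hofl]; exact List.mem_singleton.mpr rfl)) R4 x hr⟩⟩

theorem newSet_mem (e : Int → Int → Bool) (n : Int) (vis : PySem.Set Int) (w : Int) :
    w ∈ newSet e n vis ↔ (0 ≤ w ∧ w < n ∧ w ∉ vis ∧ ∃ v ∈ vis, e v w = true) := by
  unfold newSet
  rw [PySem.Set.mem_ofList, List.mem_filter]
  simp only [Bool.and_eq_true, Bool.not_eq_true', List.any_eq_true,
    PySem.List.mem_pyRange_one]
  constructor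
  · rintro ⟨⟨h0, hn⟩, hc, v, hv, he⟩
    refine ⟨h0, hn, fun hm => ?_, v, hv, he⟩
    have := (PySem.Set.contains_iff _ _).mpr hm
    rw [hc] at this
    exact Bool.false_ne_true this
  · rintro ⟨h0, hn, hc, v, hv, he⟩
    refine ⟨⟨h0, hn⟩, ?_, v, hv, he⟩
    by_cases hb : PySem.Set.contains vis w = true
    · exact absurd ((PySem.Set.contains_iff _ _).mp hb) hc
    · simpa using hb

theorem reachIter_spec (e : Int → Int → Bool) (n : Int) (L : List Int) (vis : PySem.Set Int)
    (h1 : vis.Nodup)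
    (h2 : ∀ v ∈ vis, Reach e n v)
    (hsub : ∀ v ∈ vis, v = 0 ∨ (0 ≤ v ∧ v < n))
    (hcount : (PySem.List.pyRange 0 n 1).length + 1 ≤ vis.length + L.length) :
    (reachIter e n L vis).Nodup ∧
    (∀ v ∈ vis, v ∈ reachIter e n L vis) ∧
    (∀ x ∈ reachIter e n L vis, Reach e n x) ∧
    (∀ v ∈ reachIter e n L vis, ∀ w : Int, 0 ≤ w → w < n → e v w = true →
      w ∈ reachIter e n L vis) := by
  induction L generalizing vis with
  | nil =>
    simp only [reachIter]
    refine ⟨h1, fun v hv => hv, h2, ?_⟩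
    intro v hv w h0w hwn he
    exfalso
    have hn1 : (0 : Int) < n := lt_of_le_of_lt h0w hwn
    have hsubR : vis ⊆ PySem.List.pyRange 0 n 1 := by
      intro x hx
      rcases hsub x hx with rfl | ⟨ha, hb⟩
      · exact PySem.List.mem_pyRange_one.mpr ⟨le_refl 0, hn1⟩
      · exact PySem.List.mem_pyRange_one.mpr ⟨ha, hb⟩
    have hlen : vis.length ≤ (PySem.List.pyRange 0 n 1).length := (h1.subperm hsubR).length_le
    simp only [List.length_nil] at hcount
    omega
  | cons a rest ih =>
    simp only [reachIter]
    split
    case isTrue hempty =>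
      refine ⟨h1, fun v hv => hv, h2, ?_⟩
      intro u hu w h0w hwn he
      by_cases hwv : w ∈ vis
      · exact hwv
      · exfalso
        have hw : w ∈ newSet e n vis := (newSet_mem e n vis w).mpr ⟨h0w, hwn, hwv, u, hu, he⟩
        rw [hempty] at hw
        exact List.not_mem_nil hw
    case isFalse hne =>
      have hnn : (newSet e n vis).Nodup := by unfold newSet; exact PySem.Set.nodup_ofList _
      have h1' : (PySem.Set.union vis (newSet e n vis)).Nodup := PySem.Set.nodup_union _ _ h1
      have h2' : ∀ x ∈ PySem.Set.union vis (newSet e n vis), Reach e n x := by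
        intro x hx
        rcases (PySem.Set.mem_union _ _ _).mp hx with hx | hx
        · exact h2 x hx
        · obtain ⟨h0, hn', _, v, hv, he⟩ := (newSet_mem e n vis x).mp hx
          exact Reach.step (h2 v hv) h0 hn' he
      have hsub' : ∀ x ∈ PySem.Set.union vis (newSet e n vis), x = 0 ∨ (0 ≤ x ∧ x < n) := by
        intro x hx
        rcases (PySem.Set.mem_union _ _ _).mp hx with hx | hx
        · exact hsub x hx
        · obtain ⟨h0, hn', _, _⟩ := (newSet_mem e n vis x).mp hx
          exact Or.inr ⟨h0, hn'⟩
      have hgrow : vis.length + 1 ≤ (PySem.Set.union vis (newSet e n vis)).length := by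
        have hu : (PySem.Set.union vis (newSet e n vis) : List Int) =
            vis ++ List.filter (fun y => !PySem.Set.contains vis y)
              (PySem.Set.ofList (newSet e n vis)) := PySem.Set.update_eq_append_filter vis _
        obtain ⟨x, hx⟩ := List.exists_mem_of_ne_nil _ hne
        have hxn : x ∉ vis := ((newSet_mem e n vis x).mp hx).2.2.1
        have hxc : PySem.Set.contains vis x = false := by
          by_cases hb : PySem.Set.contains vis x = true
          · exact absurd ((PySem.Set.contains_iff _ _).mp hb) hxn
          · simpa using hb
        have hxf : x ∈ List.filter (fun y => !PySem.Set.contains vis y)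
            (PySem.Set.ofList (newSet e n vis)) :=
          List.mem_filter.mpr ⟨(PySem.Set.mem_ofList _ _).mpr hx, by rw [hxc]; rfl⟩
        have hpos : 0 < (List.filter (fun y => !PySem.Set.contains vis y)
            (PySem.Set.ofList (newSet e n vis))).length := List.length_pos_of_mem hxf
        rw [hu, List.length_append]
        omega
      have hcount' : (PySem.List.pyRange 0 n 1).length + 1 ≤
          (PySem.Set.union vis (newSet e n vis)).length + rest.length := by
        simp only [List.length_cons] at hcount
        omega
      obtain ⟨R1, R2, R3, R4⟩ := ih (PySem.Set.union vis (newSet e n vis)) h1' h2' hsub' hcount'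
      exact ⟨R1, fun v hv => R2 v ((PySem.Set.mem_union _ _ _).mpr (Or.inl hv)), R3, R4⟩

theorem reach_mem (e : Int → Int → Bool) (n : Int) :
    (reachIter e n (PySem.List.pyRange 0 n 1) (PySem.Set.ofList [0])).Nodup ∧
    (∀ x, x ∈ reachIter e n (PySem.List.pyRange 0 n 1) (PySem.Set.ofList [0]) ↔ Reach e n x) := by
  have hofl : (PySem.Set.ofList [0] : List Int) = [0] := by decide
  obtain ⟨R1, R2, R3, R4⟩ := reachIter_spec e n (PySem.List.pyRange 0 n 1) (PySem.Set.ofList [0])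
    (by rw [hofl]; exact List.nodup_singleton 0)
    (by rw [hofl]; intro v hv; rcases List.mem_singleton.mp hv with rfl; exact Reach.zero)
    (by rw [hofl]; intro v hv; rcases List.mem_singleton.mp hv with rfl; exact Or.inl rfl)
    (by rw [hofl]; simp)
  exact ⟨R1, fun x => ⟨R3 x, fun hr =>
    Reach_subset e n _ (R2 0 (by rw [hofl]; exact List.mem_singleton.mpr rfl)) R4 x hr⟩⟩

theorem len_eq (e : Int → Int → Bool) (n : Int) :
    PySem.Set.len (bfsLoop e n (PySem.Set.ofList [0]) [0]) =
      PySem.Set.len (reachIter e n (PySem.List.pyRange 0 n 1) (PySem.Set.ofList [0])) := by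
  obtain ⟨hn1, hm1⟩ := bfs_mem e n
  obtain ⟨hn2, hm2⟩ := reach_mem e n
  have : (bfsLoop e n (PySem.Set.ofList [0]) [0]).length =
      (reachIter e n (PySem.List.pyRange 0 n 1) (PySem.Set.ofList [0])).length :=
    ((List.perm_ext_iff_of_nodup hn1 hn2).mpr (fun a => (hm1 a).trans (hm2 a).symm)).length_eq
  simp [PySem.Set.len, this]

-- ===== VERDICT (by name: the statement is the Claim_ definition above) =====
theorem is_strongly_connected_spec : Claim_equal_is_strongly_connected := by
  intro T n _ _
  unfold Spec_is_strongly_connected is_strongly_connected is_strongly_connected_alt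
  dsimp only
  rw [len_eq (fun v w => PySem.List.pyGetD (PySem.List.pyGetD T v []) w 0 != 0) n,
      len_eq (fun v w => PySem.List.pyGetD (PySem.List.pyGetD T w []) v 0 != 0) n]
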